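-- pv_equiv track=rewrite | github.com/seb59520/literie-processor | MATELAS_Compact_Installer/app_files/backend/article_utils.py | contient_fermeture_liaison
-- ===== SOURCE A (Python) =====
-- import unicodedata
--
-- def normalize_str(s):
--     """Supprime les accents et met en minuscules."""
--     return ''.join(
--         c for c in unicodedata.normalize('NFD', s or '')
--         if unicodedata.category(c) != 'Mn'
--     ).lower()
--
-- def contient_fermeture_liaison(articles):
--     """
--     Retourne True si un article contient 'Fermeture de liaison' ou variantes (insensible à la casse), sinon False.
--     """
--     mots_cles = [
--         'fermeture de liaison',
--         'fermeture de liasion',  # Faute de frappe courante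
--         'fermeture liaison',
--         'fermeture liasion',     # Faute de frappe courante
--         'fdl'                    # Abréviation
--     ]
--
--     for article in articles:
--         desc = normalize_str(article.get('description', ''))
--         if any(mot in desc for mot in mots_cles):
--             return True
--     return False
-- ===== SOURCE B (Python) =====
-- import unicodedata
--
-- def normalize_str(s):
--     """Supprime les accents et met en minuscules."""
--     return ''.join(
--         c for c in unicodedata.normalize('NFD', s or '')
--         if unicodedata.category(c) != 'Mn'
--     ).lower()
--
-- _KEYWORDS = [
--     'fermeture de liaison',
--     'fermeture de liasion',
--     'fermeture liaison',
--     'fermeture liasion',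
--     'fdl',
-- ]
--
-- def contient_fermeture_liaison(articles):
--     # Build one corpus: all normalized descriptions joined by '\n'.  No keyword
--     # contains '\n', so a keyword occurs in the corpus iff it occurs in some
--     # single description; search each keyword once over the whole corpus.
--     corpus = "\n".join(normalize_str(a.get('description', '')) for a in articles)
--     return any(kw in corpus for kw in _KEYWORDS)
-- ===== Notes on version B (the rewrite author's own statement) =====
-- stated objective: alternative
-- what changed: Instead of A's per-article loop that tests all five keywords against each description with early return, B first joins every normalized description into one newline-separated corpus and then runs each keyword search once over the whole corpus (correct because no keyword contains a newline).
import Mathlib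
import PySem

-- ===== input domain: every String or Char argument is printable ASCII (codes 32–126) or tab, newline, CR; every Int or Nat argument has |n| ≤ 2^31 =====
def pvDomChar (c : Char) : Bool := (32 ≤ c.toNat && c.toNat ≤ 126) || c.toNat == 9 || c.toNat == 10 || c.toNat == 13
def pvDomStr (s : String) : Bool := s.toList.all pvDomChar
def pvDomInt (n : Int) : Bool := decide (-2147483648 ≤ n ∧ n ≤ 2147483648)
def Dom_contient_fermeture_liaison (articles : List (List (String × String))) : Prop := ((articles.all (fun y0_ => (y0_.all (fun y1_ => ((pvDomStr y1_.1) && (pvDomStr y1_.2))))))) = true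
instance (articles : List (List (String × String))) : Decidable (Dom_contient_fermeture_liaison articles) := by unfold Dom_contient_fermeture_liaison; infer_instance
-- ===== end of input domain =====

-- B joins all normalized descriptions into one newline-separated corpus and searches
-- each keyword once over that corpus, instead of A's per-article keyword loop
-- (objective: alternative; sound because no keyword contains a newline).

-- ===== PORT A =====
-- normalize_str: on the ASCII domain NFD is the identity and no character has category
-- 'Mn', so the port is exactly .lower(); exact on the stated ASCII domain.
def pvNormalize (s : String) : String := PySem.Str.lower s

def pvMotsCles : List String :=
  ["fermeture de liaison", "fermeture de liasion", "fermeture liaison", "fermeture liasion", "fdl"]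

-- the for-loop with early `return True`, one article at a time
def contient_fermeture_liaison : List (List (String × String)) → Bool
  | [] => false
  | article :: rest =>
      let desc := pvNormalize ((PySem.Dict.mk article).getD "description" "")
      if pvMotsCles.any (fun mot => PySem.Str.isIn mot desc) then true
      else contient_fermeture_liaison rest

-- ===== PORT B =====
def contient_fermeture_liaison_alt (articles : List (List (String × String))) : Bool :=
  let corpus := PySem.Str.join "\n"
    (articles.map (fun a => pvNormalize ((PySem.Dict.mk a).getD "description" "")))
  pvMotsCles.any (fun kw => PySem.Str.isIn kw corpus)

-- ===== PRECONDITION & SPEC =====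
def Spec_contient_fermeture_liaison (articles : List (List (String × String))) (out : Bool) : Prop := out = contient_fermeture_liaison_alt articles
instance (articles : List (List (String × String))) (out : Bool) : Decidable (Spec_contient_fermeture_liaison articles out) := by unfold Spec_contient_fermeture_liaison; infer_instance

-- ===== CLAIM (what is proved, stated in full; the proofs are below) =====
def Claim_equal_contient_fermeture_liaison : Prop := ∀ (articles : List (List (String × String))), Dom_contient_fermeture_liaison articles → Spec_contient_fermeture_liaison articles (contient_fermeture_liaison articles)

-- ===== LEMMAS AND PROOFS =====

-- a newline-free prefix of u ++ '\n' :: ys is already a prefix of u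
theorem prefix_of_sep {sub : List Char} (hn : ('\n' : Char) ∉ sub) :
    ∀ (u ys : List Char), sub <+: u ++ '\n' :: ys → sub <+: u := by
  induction sub with
  | nil => intro u ys _; exact List.nil_prefix
  | cons a s' ih =>
      intro u ys h
      cases u with
      | nil =>
          rcases (List.cons_prefix_cons.mp h) with ⟨ha, _⟩
          exact absurd (ha ▸ List.mem_cons_self) hn
      | cons b u' =>
          rcases (List.cons_prefix_cons.mp h) with ⟨ha, htail⟩
          have hn' : ('\n' : Char) ∉ s' := fun hm => hn (List.mem_cons_of_mem _ hm)
          exact List.cons_prefix_cons.mpr ⟨ha, ih hn' u' ys htail⟩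

-- a nonempty newline-free keyword occurs in xs ++ '\n' :: ys iff it occurs in xs or in ys
theorem isIn_append_sep (kw xs ys : List Char) (hne : kw ≠ [])
    (hn : ('\n' : Char) ∉ kw) :
    PySem.Chars.isIn kw (xs ++ '\n' :: ys)
      = (PySem.Chars.isIn kw xs || PySem.Chars.isIn kw ys) := by
  rw [Bool.eq_iff_iff, Bool.or_eq_true]
  rw [← PySem.Chars.exists_prefix_drop_iff_isIn, ← PySem.Chars.exists_prefix_drop_iff_isIn,
      ← PySem.Chars.exists_prefix_drop_iff_isIn]
  constructor
  · rintro ⟨j, hj⟩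
    by_cases hle : j ≤ xs.length
    · rw [List.drop_append] at hj
      have : j - xs.length = 0 := by omega
      rw [this, List.drop_zero] at hj
      exact Or.inl ⟨j, prefix_of_sep hn _ _ hj⟩
    · rw [List.drop_append] at hj
      have hxs : xs.drop j = [] := List.drop_eq_nil_of_le (by omega)
      obtain ⟨k, hk⟩ : ∃ k, j - xs.length = k + 1 := ⟨j - xs.length - 1, by omega⟩
      rw [hxs, hk, List.nil_append, List.drop_succ_cons] at hj
      exact Or.inr ⟨k, hj⟩
  · rintro (⟨j, hj⟩ | ⟨j, hj⟩)
    · by_cases hle : j ≤ xs.length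
      · refine ⟨j, ?_⟩
        rw [List.drop_append]
        have : j - xs.length = 0 := by omega
        rw [this, List.drop_zero]
        exact hj.trans (List.prefix_append _ _)
      · exfalso
        rw [List.drop_eq_nil_of_le (by omega)] at hj
        exact hne (List.prefix_nil.mp hj)
    · refine ⟨xs.length + 1 + j, ?_⟩
      rw [List.drop_append]
      have h1 : xs.drop (xs.length + 1 + j) = [] := List.drop_eq_nil_of_le (by omega)
      have h2 : xs.length + 1 + j - xs.length = j + 1 := by omega
      rw [h1, h2, List.nil_append, List.drop_succ_cons]
      exact hj

-- Boolean reshuffle used to split the five-keyword disjunction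
theorem shuffle5 (a1 b1 a2 b2 a3 b3 a4 b4 a5 b5 : Bool) :
    ((a1 || b1) || ((a2 || b2) || ((a3 || b3) || ((a4 || b4) || ((a5 || b5) || false)))))
      = ((a1 || (a2 || (a3 || (a4 || (a5 || false)))))
          || (b1 || (b2 || (b3 || (b4 || (b5 || false)))))) := by
  cases a1 <;> cases b1 <;> cases a2 <;> cases b2 <;> cases a3 <;> cases b3 <;>
    cases a4 <;> cases b4 <;> cases a5 <;> cases b5 <;> rfl

-- join over a nonempty tail, without unfolding the tail
theorem join_cons_ne_nil (sep p : List Char) (rest : List (List Char)) (h : rest ≠ []) :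
    PySem.Chars.join sep (p :: rest) = p ++ sep ++ PySem.Chars.join sep rest := by
  cases rest with
  | nil => exact absurd rfl h
  | cons q rs => exact PySem.Chars.join_cons_cons sep p q rs

-- the corpus search in character form
theorem alt_chars (articles : List (List (String × String))) :
    contient_fermeture_liaison_alt articles
      = pvMotsCles.any (fun kw => PySem.Chars.isIn kw.toList
          (PySem.Chars.join ['\n']
            (articles.map (fun a =>
              (pvNormalize ((PySem.Dict.mk a).getD "description" "")).toList)))) := by
  unfold contient_fermeture_liaison_alt
  simp only [PySem.Str.isIn_eq, PySem.Str.toList_join, List.map_map]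
  rfl

theorem ports_eq (articles : List (List (String × String))) :
    contient_fermeture_liaison articles = contient_fermeture_liaison_alt articles := by
  induction articles with
  | nil => decide
  | cons a rest ih =>
      rw [alt_chars]
      simp only [contient_fermeture_liaison]
      cases rest with
      | nil =>
          simp only [List.map, PySem.Chars.join_singleton, PySem.Str.isIn_eq]
          split_ifs with h
          · exact h.symm
          · exact ((Bool.not_eq_true _).mp h).symm
      | cons b rs =>
          rw [List.map_cons, join_cons_ne_nil _ _ _ (by simp)]
          simp only [List.append_assoc, List.singleton_append]
          have hsplit : (pvMotsCles.any fun kw => PySem.Chars.isIn kw.toList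
              ((pvNormalize ((PySem.Dict.mk a).getD "description" "")).toList ++ '\n' ::
                PySem.Chars.join ['\n'] ((b :: rs).map (fun x =>
                  (pvNormalize ((PySem.Dict.mk x).getD "description" "")).toList))))
            = ((pvMotsCles.any fun kw => PySem.Chars.isIn kw.toList
                (pvNormalize ((PySem.Dict.mk a).getD "description" "")).toList)
              || (pvMotsCles.any fun kw => PySem.Chars.isIn kw.toList
                (PySem.Chars.join ['\n'] ((b :: rs).map (fun x =>
                  (pvNormalize ((PySem.Dict.mk x).getD "description" "")).toList))))) := by
            simp only [pvMotsCles, List.any_cons, List.any_nil]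
            rw [isIn_append_sep _ _ _ (by decide) (by decide),
              isIn_append_sep _ _ _ (by decide) (by decide),
              isIn_append_sep _ _ _ (by decide) (by decide),
              isIn_append_sep _ _ _ (by decide) (by decide),
              isIn_append_sep _ _ _ (by decide) (by decide)]
            exact shuffle5 _ _ _ _ _ _ _ _ _ _
          rw [hsplit, ← alt_chars]
          split_ifs with h <;> simp only [PySem.Str.isIn_eq] at h <;> simp [h, ih]

-- ===== VERDICT (by name: the statement is the Claim_ definition above) =====
theorem contient_fermeture_liaison_spec : Claim_equal_contient_fermeture_liaison :=
  fun articles _ => ports_eq articles
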